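-- pv_equiv track=rewrite | github.com/jwl-7/c0de_gr1nd | python_solutions/picking_up_coins.py | maximum_revenue
-- ===== SOURCE A (Python) =====
-- def maximum_revenue(coins):
--     def max_coin(x, y):
--         if x > y:
--             return 0
--
--         if dp[x][y] == 0:
--             start = coins[x] + min(max_coin(x + 2, y), max_coin(x + 1, y - 1))
--             end = coins[y] + min(max_coin(x + 1, y - 1), max_coin(x, y - 2))
--             dp[x][y] = max(start, end)
--         return dp[x][y]
--
--     dp = [[0] * len(coins) for _ in coins]
--     return max_coin(0, len(coins) - 1)
-- ===== SOURCE B (Python) =====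
-- def maximum_revenue(coins):
--     n = len(coins)
--     if n == 0:
--         return 0
--     # bottom-up DP over interval lengths of the same parity as n, rolling a single row:
--     # row[x] holds the value of the interval starting at x with the current length.
--     if n % 2 == 0:
--         row, L = [0] * (n + 1), 2
--     else:
--         row, L = list(coins), 3
--     while L <= n:
--         row = [max(coins[x] + min(row[x + 2], row[x + 1]),
--                    coins[x + L - 1] + min(row[x + 1], row[x]))
--                for x in range(n - L + 1)]
--         L += 2
--     return row[0]
-- ===== Notes on version B (the rewrite author's own statement) =====
-- stated objective: faster
-- what changed: Replaces A's memoized recursion over a preallocated n×n table with an iterative bottom-up DP that rolls a single O(n) row over interval lengths of the same parity as n, removing Python recursion overhead and the n×n table.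
import Mathlib
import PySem

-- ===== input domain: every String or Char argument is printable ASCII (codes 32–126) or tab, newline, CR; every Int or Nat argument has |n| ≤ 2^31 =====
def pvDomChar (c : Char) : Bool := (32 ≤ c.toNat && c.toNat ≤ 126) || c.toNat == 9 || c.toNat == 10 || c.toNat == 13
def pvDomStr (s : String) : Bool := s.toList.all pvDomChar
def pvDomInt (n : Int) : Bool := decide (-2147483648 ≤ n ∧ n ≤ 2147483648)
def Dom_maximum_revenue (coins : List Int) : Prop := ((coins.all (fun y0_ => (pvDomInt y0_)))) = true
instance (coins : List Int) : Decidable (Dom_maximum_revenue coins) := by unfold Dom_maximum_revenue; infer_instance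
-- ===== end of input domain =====

-- B is a bottom-up rolling-row DP over interval lengths (same value-recurrence, iterative decomposition) instead of A's memoized recursion.

-- ===== PORT A =====
-- dp[x][y] read / write (indices are always in range in A's recursion; default only makes the access total)
def dpGet (dp : List (List Int)) (i j : Int) : Int :=
  PySem.List.pyGetD (PySem.List.pyGetD dp i []) j 0

def dpSet (dp : List (List Int)) (i j : Int) (v : Int) : List (List Int) :=
  PySem.List.pySetD dp i (PySem.List.pySetD (PySem.List.pyGetD dp i []) j v)

-- the inner recursive max_coin, threading the memo table dp as state.
-- fuel is a structural totality guard only: maximum_revenue passes len(coins)+1,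
-- which exceeds the recursion depth, so the 0-fuel branch is never reached.
def maxCoinA (coins : List Int) : Nat → Int → Int → List (List Int) → Int × List (List Int)
  | 0, _, _, dp => (0, dp)
  | fuel + 1, x, y, dp =>
    if x > y then (0, dp)
    else if dpGet dp x y == 0 then
      let r1 := maxCoinA coins fuel (x + 2) y dp
      let r2 := maxCoinA coins fuel (x + 1) (y - 1) r1.2
      let start := PySem.List.pyGetD coins x 0 + min r1.1 r2.1
      let r3 := maxCoinA coins fuel (x + 1) (y - 1) r2.2
      let r4 := maxCoinA coins fuel x (y - 2) r3.2
      let end_ := PySem.List.pyGetD coins y 0 + min r3.1 r4.1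
      let dp' := dpSet r4.2 x y (max start end_)
      (dpGet dp' x y, dp')
    else (dpGet dp x y, dp)

def maximum_revenue (coins : List Int) : Int :=
  (maxCoinA coins (coins.length + 1) 0 ((coins.length : Int) - 1)
    (coins.map (fun _ => List.replicate coins.length (0 : Int)))).1

-- ===== PORT B =====
-- one comprehension step: from the row for length L-2 to the row for length L
def bRow (coins row : List Int) (L : Int) : List Int :=
  (PySem.List.pyRange 0 ((coins.length : Int) - L + 1) 1).map (fun x =>
    max (PySem.List.pyGetD coins x 0 +
          min (PySem.List.pyGetD row (x + 2) 0) (PySem.List.pyGetD row (x + 1) 0))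
        (PySem.List.pyGetD coins (x + L - 1) 0 +
          min (PySem.List.pyGetD row (x + 1) 0) (PySem.List.pyGetD row x 0)))

-- the while loop: L grows by 2 until it exceeds len(coins).
-- fuel is a structural totality guard only: len(coins)+1 exceeds the iteration count.
def bLoop (coins : List Int) : List Int → Int → Nat → List Int
  | row, _, 0 => row
  | row, L, fuel + 1 =>
    if L ≤ (coins.length : Int) then bLoop coins (bRow coins row L) (L + 2) fuel else row

def maximum_revenue_alt (coins : List Int) : Int :=
  if coins.length == 0 then 0
  else
    let p : List Int × Int :=
      if coins.length % 2 == 0 then (List.replicate (coins.length + 1) (0 : Int), 2)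
      else (coins, 3)
    PySem.List.pyGetD (bLoop coins p.1 p.2 (coins.length + 1)) 0 0

-- ===== PRECONDITION & SPEC =====
def Spec_maximum_revenue (coins : List Int) (out : Int) : Prop := out = maximum_revenue_alt coins
instance (coins : List Int) (out : Int) : Decidable (Spec_maximum_revenue coins out) := by unfold Spec_maximum_revenue; infer_instance

-- ===== CLAIM (what is proved, stated in full; the proofs are below) =====
def Claim_equal_maximum_revenue : Prop := ∀ (coins : List Int), Dom_maximum_revenue coins → Spec_maximum_revenue coins (maximum_revenue coins)

-- ===== LEMMAS AND PROOFS =====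

-- the pure value recurrence both programs compute
def mcSpec (coins : List Int) (x y : Int) : Int :=
  if x > y then 0
  else
    max (PySem.List.pyGetD coins x 0 +
          min (mcSpec coins (x + 2) y) (mcSpec coins (x + 1) (y - 1)))
        (PySem.List.pyGetD coins y 0 +
          min (mcSpec coins (x + 1) (y - 1)) (mcSpec coins x (y - 2)))
termination_by (y - x + 1).toNat
decreasing_by all_goals omega

theorem mcSpec_of_gt (coins : List Int) (x y : Int) (h : x > y) : mcSpec coins x y = 0 := by
  rw [mcSpec]; simp [h]

theorem mcSpec_single (coins : List Int) (x : Int) :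
    mcSpec coins x x = PySem.List.pyGetD coins x 0 := by
  rw [mcSpec]
  rw [mcSpec_of_gt _ _ _ (by omega), mcSpec_of_gt _ _ _ (by omega), mcSpec_of_gt _ _ _ (by omega)]
  simp


-- row represents all intervals of length L: row[k] = value of coins[k .. k+L-1]
def RowOK (coins row : List Int) (L : Int) : Prop :=
  ((row.length : Int) = (coins.length : Int) - L + 1) ∧
  ∀ k : Nat, k < row.length → row.getD k 0 = mcSpec coins k ((k : Int) + L - 1)

theorem mcSpec_step (coins : List Int) (x y : Int) (h : x ≤ y) :
    mcSpec coins x y =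
      max (PySem.List.pyGetD coins x 0 +
            min (mcSpec coins (x + 2) y) (mcSpec coins (x + 1) (y - 1)))
          (PySem.List.pyGetD coins y 0 +
            min (mcSpec coins (x + 1) (y - 1)) (mcSpec coins x (y - 2))) := by
  rw [mcSpec, if_neg (by omega)]

theorem bRow_ok (coins row : List Int) (L : Int) (h2 : 2 ≤ L)
    (hLn : L ≤ (coins.length : Int)) (hrow : RowOK coins row (L - 2)) :
    RowOK coins (bRow coins row L) L := by
  obtain ⟨hlen, hval⟩ := hrow
  have hlen' : ((bRow coins row L).length : Int) = (coins.length : Int) - L + 1 := by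
    simp [bRow, PySem.List.length_pyRange_one]
    omega
  refine ⟨hlen', ?_⟩
  intro k hk
  have hkI : (k : Int) < (coins.length : Int) - L + 1 := by
    have := hlen'
    omega
  have hget : (bRow coins row L).getD k 0 =
      max (PySem.List.pyGetD coins (0 + (k:Int)) 0 +
            min (PySem.List.pyGetD row (0 + (k:Int) + 2) 0) (PySem.List.pyGetD row (0 + (k:Int) + 1) 0))
          (PySem.List.pyGetD coins (0 + (k:Int) + L - 1) 0 +
            min (PySem.List.pyGetD row (0 + (k:Int) + 1) 0) (PySem.List.pyGetD row (0 + (k:Int)) 0)) := by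
    rw [bRow] at hk ⊢
    rw [List.getD_eq_getElem _ _ hk]
    rw [List.getElem_map, PySem.List.getElem_pyRange_one]
  rw [hget]
  have e0 : (0 : Int) + (k : Int) = ((k : Nat) : Int) := by omega
  rw [e0]
  have hv' : ∀ j : Int, 0 ≤ j → j < (coins.length : Int) - L + 3 →
      PySem.List.pyGetD row j 0 = mcSpec coins j (j + (L - 2) - 1) := by
    intro j h0 hj
    obtain ⟨jn, rfl⟩ := Int.eq_ofNat_of_zero_le h0
    rw [PySem.List.pyGetD_natCast]
    exact hval jn (by omega)
  rw [hv' ((k:Int) + 2) (by omega) (by omega), hv' ((k:Int) + 1) (by omega) (by omega),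
      hv' (k:Int) (by omega) (by omega)]
  have a1 : ((k:Int)) + 2 + (L - 2) - 1 = (k:Int) + L - 1 := by ring
  have a2 : ((k:Int)) + 1 + (L - 2) - 1 = (k:Int) + L - 1 - 1 := by ring
  have a3 : ((k:Int)) + (L - 2) - 1 = (k:Int) + L - 1 - 2 := by ring
  rw [a1, a2, a3, mcSpec_step coins (k:Int) ((k:Int) + L - 1) (by omega)]

theorem bLoop_ok (coins : List Int) : ∀ (fuel : Nat) (L : Int) (row : List Int),
    ((coins.length : Int) - L + 2).toNat ≤ fuel → 2 ≤ L → L - 2 ≤ (coins.length : Int) →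
    L % 2 = (coins.length : Int) % 2 → RowOK coins row (L - 2) →
    RowOK coins (bLoop coins row L fuel) (coins.length : Int) := by
  intro fuel
  induction fuel with
  | zero =>
    intro L row hm h2 hub hpar hrow
    have : L - 2 = (coins.length : Int) := by omega
    rw [bLoop]
    rwa [this] at hrow
  | succ m ih =>
    intro L row hm h2 hub hpar hrow
    by_cases hle : L ≤ (coins.length : Int)
    · rw [bLoop, if_pos hle]
      exact ih (L + 2) _ (by omega) (by omega) (by omega) (by omega)
        (by simpa using bRow_ok coins row L h2 hle hrow)
    · rw [bLoop, if_neg hle]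
      have heq : L - 2 = (coins.length : Int) := by omega
      rwa [heq] at hrow

theorem alt_eq_mcSpec (coins : List Int) :
    maximum_revenue_alt coins = mcSpec coins 0 ((coins.length : Int) - 1) := by
  by_cases hnil : coins.length = 0
  · rw [maximum_revenue_alt, if_pos (by simp [hnil]), mcSpec_of_gt _ _ _ (by omega)]
  · have h1 : 1 ≤ coins.length := Nat.one_le_iff_ne_zero.mpr hnil
    rw [maximum_revenue_alt, if_neg (by simp [hnil])]
    by_cases hpar : coins.length % 2 = 0
    · have hrow : RowOK coins (List.replicate (coins.length + 1) 0) 0 := by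
        refine ⟨by simp, ?_⟩
        intro k hk
        rw [List.getD_eq_getElem _ _ hk, List.getElem_replicate,
          mcSpec_of_gt _ _ _ (by omega)]
      have hres := bLoop_ok coins (coins.length + 1) 2
        (List.replicate (coins.length + 1) 0) (by omega) (by omega) (by omega)
        (by omega) (by simpa using hrow)
      obtain ⟨hl, hv⟩ := hres
      simp only [hpar, beq_self_eq_true, if_pos]
      rw [PySem.List.pyGetD_zero]
      have h0 : 0 < (bLoop coins (List.replicate (coins.length + 1) 0) 2 (coins.length + 1)).length := by omega
      have := hv 0 h0
      simpa using this
    · have hrow : RowOK coins coins 1 := by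
        refine ⟨by omega, ?_⟩
        intro k hk
        have : ((k : Int)) + 1 - 1 = (k : Int) := by ring
        rw [this, mcSpec_single, PySem.List.pyGetD_natCast]
      have hres := bLoop_ok coins (coins.length + 1) 3 coins
        (by omega) (by omega) (by omega) (by omega) (by simpa using hrow)
      obtain ⟨hl, hv⟩ := hres
      have hpar' : (coins.length % 2 == 0) = false := by
        simp [hpar]
      simp only [hpar', Bool.false_eq_true, if_false]
      rw [PySem.List.pyGetD_zero]
      have h0 : 0 < (bLoop coins coins 3 (coins.length + 1)).length := by omega
      have := hv 0 h0
      simpa using this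


-- ---- A-side: dp table lemmas ----
theorem dpGet_nat (dp : List (List Int)) (i j : Nat) :
    dpGet dp (i : Int) (j : Int) = (dp.getD i []).getD j 0 := by
  simp [dpGet]

theorem dpSet_nat (dp : List (List Int)) (i j : Nat) (v : Int) :
    dpSet dp (i : Int) (j : Int) v = dp.set i ((dp.getD i []).set j v) := by
  simp [dpSet]

theorem dpSet_length (dp : List (List Int)) (x y v : Int) :
    (dpSet dp x y v).length = dp.length := by
  simp [dpSet, PySem.List.length_pySetD]

theorem getD_set_if {α : Type} (l : List α) (d : α) (x k : Nat) (r : α) :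
    (l.set x r).getD k d = if x = k ∧ x < l.length then r else l.getD k d := by
  rw [List.getD_eq_getElem?_getD, List.getElem?_set]
  by_cases h1 : x = k
  · subst h1
    by_cases h2 : x < l.length
    · simp [h2]
    · have hx : l[x]? = none := List.getElem?_eq_none_iff.mpr (by omega)
      simp only [if_neg h2, hx, Option.getD_none, List.getD_eq_getElem?_getD]
      simp [h2]
  · simp [h1, List.getD_eq_getElem?_getD]

theorem dpGet_dpSet_self (dp : List (List Int)) (i j : Nat) (v : Int)
    (hi : i < dp.length) (hj : j < (dp.getD i []).length) :
    dpGet (dpSet dp (i : Int) (j : Int) v) (i : Int) (j : Int) = v := by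
  rw [dpSet_nat, dpGet_nat, getD_set_if, if_pos ⟨rfl, hi⟩, getD_set_if, if_pos ⟨rfl, hj⟩]

theorem dpGet_dpSet_ne (dp : List (List Int)) (x y i j : Nat) (v : Int)
    (hne : ¬ (i = x ∧ j = y)) :
    dpGet (dpSet dp (x : Int) (y : Int) v) (i : Int) (j : Int) = dpGet dp (i : Int) (j : Int) := by
  rw [dpSet_nat, dpGet_nat, dpGet_nat, getD_set_if]
  by_cases hix : x = i ∧ x < dp.length
  · rw [if_pos hix, getD_set_if]
    have : ¬ (y = j ∧ y < (dp.getD x []).length) := by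
      intro hc
      exact hne ⟨hix.1.symm, hc.1.symm⟩
    rw [if_neg this, hix.1]
  · rw [if_neg hix]

theorem dpSet_rowlen (dp : List (List Int)) (x y : Nat) (v : Int) (k : Nat) :
    ((dpSet dp (x : Int) (y : Int) v).getD k []).length = (dp.getD k []).length := by
  rw [dpSet_nat, getD_set_if]
  by_cases h : x = k ∧ x < dp.length
  · rw [if_pos h, List.length_set, h.1]
  · rw [if_neg h]

-- dp is n×n and every nonzero entry already holds the recurrence value
def InvA (coins : List Int) (dp : List (List Int)) : Prop :=
  dp.length = coins.length ∧
  (∀ k : Nat, k < dp.length → (dp.getD k []).length = coins.length) ∧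
  (∀ i j : Nat, (dp.getD i []).getD j 0 = 0 ∨
      (dp.getD i []).getD j 0 = mcSpec coins (i : Int) (j : Int))

theorem maxCoinA_ok (coins : List Int) : ∀ (fuel : Nat) (x y : Int) (dp : List (List Int)),
    (y - x + 1).toNat < fuel → 0 ≤ x → y < (coins.length : Int) → InvA coins dp →
    (maxCoinA coins fuel x y dp).1 = mcSpec coins x y ∧
      InvA coins (maxCoinA coins fuel x y dp).2 := by
  intro fuel
  induction fuel with
  | zero =>
    intro x y dp hm hx0 hyn hInv
    exact absurd hm (by omega)
  | succ m ih =>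
    intro x y dp hm hx0 hyn hInv
    by_cases hxy : x > y
    · rw [maxCoinA, if_pos hxy]
      exact ⟨(mcSpec_of_gt _ _ _ hxy).symm, hInv⟩
    · have hy0 : 0 ≤ y := by omega
      obtain ⟨a, rfl⟩ := Int.eq_ofNat_of_zero_le hx0
      obtain ⟨b, rfl⟩ := Int.eq_ofNat_of_zero_le hy0
      by_cases h0 : dpGet dp (a : Int) (b : Int) = 0
      · rw [maxCoinA, if_neg hxy, if_pos (by simp [h0])]
        obtain ⟨e1, I1⟩ := ih ((a : Int)+2) (b : Int) dp (by omega) (by omega) hyn hInv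
        obtain ⟨e2, I2⟩ := ih ((a : Int)+1) ((b : Int)-1) _ (by omega) (by omega) (by omega) I1
        obtain ⟨e3, I3⟩ := ih ((a : Int)+1) ((b : Int)-1) _ (by omega) (by omega) (by omega) I2
        obtain ⟨e4, I4⟩ := ih (a : Int) ((b : Int)-2) _ (by omega) (by omega) (by omega) I3
        dsimp only
        rw [e1, e2, e3, e4]
        obtain ⟨hlen4, hrow4, hent4⟩ := I4
        have hxl : a < (maxCoinA coins m (a : Int) ((b : Int) - 2) (maxCoinA coins m ((a : Int) + 1) ((b : Int) - 1) (maxCoinA coins m ((a : Int) + 1) ((b : Int) - 1) (maxCoinA coins m ((a : Int) + 2) (b : Int) dp).2).2).2).2.length := by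
          omega
        have hyl : b < ((maxCoinA coins m (a : Int) ((b : Int) - 2) (maxCoinA coins m ((a : Int) + 1) ((b : Int) - 1) (maxCoinA coins m ((a : Int) + 1) ((b : Int) - 1) (maxCoinA coins m ((a : Int) + 2) (b : Int) dp).2).2).2).2.getD a []).length := by
          rw [hrow4 a (by omega)]
          omega
        constructor
        · rw [dpGet_dpSet_self _ _ _ _ hxl hyl, mcSpec_step coins (a : Int) (b : Int) (by omega)]
        · refine ⟨by rw [dpSet_length]; exact hlen4, ?_, ?_⟩
          · intro k hk
            rw [dpSet_length] at hk
            rw [dpSet_rowlen]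
            exact hrow4 k hk
          · intro i j
            by_cases hij : i = a ∧ j = b
            · right
              obtain ⟨hi, hj⟩ := hij
              subst hi; subst hj
              rw [← dpGet_nat]
              rw [dpGet_dpSet_self _ _ _ _ hxl hyl, mcSpec_step coins (i : Int) (j : Int) (by omega)]
            · rw [← dpGet_nat, dpGet_dpSet_ne _ _ _ _ _ _ hij, dpGet_nat]
              exact hent4 i j
      · rw [maxCoinA, if_neg hxy, if_neg (by simp [h0])]
        refine ⟨?_, hInv⟩
        have := hInv.2.2 a b
        rw [← dpGet_nat] at this
        rcases this with h | h
        · exact absurd h h0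
        · rw [h]

theorem initInv (coins : List Int) :
    InvA coins (coins.map (fun _ => List.replicate coins.length (0 : Int))) := by
  refine ⟨by simp, ?_, ?_⟩
  · intro k hk
    rw [List.length_map] at hk
    simp [List.getD_eq_getElem?_getD, hk]
  · intro i j
    left
    rcases lt_or_ge i coins.length with hi | hi
    · simp [List.getD_eq_getElem?_getD, List.getElem?_replicate, hi]
      split <;> rfl
    · have : ¬ i < coins.length := by omega
      simp [List.getD_eq_getElem?_getD, this]

theorem maximum_revenue_spec : Claim_equal_maximum_revenue := by
  unfold Claim_equal_maximum_revenue
  intro coins _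
  unfold Spec_maximum_revenue
  rw [alt_eq_mcSpec, maximum_revenue]
  exact (maxCoinA_ok coins (coins.length + 1) 0 ((coins.length : Int) - 1) _
    (by omega) (by omega) (by omega) (initInv coins)).1
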